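-- pv_equiv track=rewrite | github.com/axiomcura/GeneQuest | genequest/analysis/alignment.py | parse_traceback_scores
-- ===== SOURCE A (Python) =====
-- def parse_traceback_scores(traceback_data):
--     """parses traceback scores and returns a list containing alignment position and
--     scores
--
--     Parameters
--     ----------
--     traceback_data : tuple
--         positions, scores obtained from the traceback function
--
--     Returns
--     --------
--     List
--        [contig_beg, contig_end, query_beg, query_end, aln score]
--     """
--     positions = traceback_data[0]
--     scores = traceback_data[1]
--
--     contig_indx = sorted([contig_pos for _, contig_pos in positions[:-1]])
--     query_indx = sorted([query_pos for query_pos, _ in positions[:-1]])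
--
--     contig_beg, contig_end = min(contig_indx), max(contig_indx)
--     query_beg, query_end = min(query_indx), max(query_indx)
--     aln_score = sum(scores)
--
--     return [contig_beg, contig_end, query_beg, query_end, aln_score]
-- ===== SOURCE B (Python) =====
-- def parse_traceback_scores(traceback_data):
--     positions = traceback_data[0]
--     scores = traceback_data[1]
--     core = positions[:-1]
--     if not core:
--         raise ValueError("empty traceback positions")
--     (q0, c0), rest = core[0], core[1:]
--     cb, ce, qb, qe = c0, c0, q0, q0
--     for q, c in rest:
--         if c < cb: cb = c
--         if ce < c: ce = c
--         if q < qb: qb = q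
--         if qe < q: qe = q
--     return [cb, ce, qb, qe, sum(scores)]
-- ===== Notes on version B (the rewrite author's own statement) =====
-- stated objective: alternative
-- what changed: Replaces the two sorted intermediate lists plus min/max calls with a single explicit pass over positions[:-1] maintaining four running extrema.
import Mathlib
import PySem

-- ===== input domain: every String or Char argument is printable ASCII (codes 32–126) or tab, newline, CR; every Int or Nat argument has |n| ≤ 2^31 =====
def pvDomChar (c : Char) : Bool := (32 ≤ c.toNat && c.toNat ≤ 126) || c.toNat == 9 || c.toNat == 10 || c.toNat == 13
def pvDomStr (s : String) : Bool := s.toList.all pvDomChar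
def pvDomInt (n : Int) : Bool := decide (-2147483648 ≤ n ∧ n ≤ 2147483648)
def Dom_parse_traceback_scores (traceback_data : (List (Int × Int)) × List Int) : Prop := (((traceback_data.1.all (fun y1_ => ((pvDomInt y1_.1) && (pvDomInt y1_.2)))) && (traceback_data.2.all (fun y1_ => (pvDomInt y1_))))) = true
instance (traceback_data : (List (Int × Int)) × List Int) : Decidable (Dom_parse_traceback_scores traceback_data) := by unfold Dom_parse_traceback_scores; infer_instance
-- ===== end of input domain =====

-- B replaces A's two sorted intermediate lists + min/max calls with one explicit pass maintaining four running extrema (same cost class on these sizes; alternative decomposition).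


-- ===== PORT A =====
def parse_traceback_scores (traceback_data : (List (Int × Int)) × List Int) : List Int :=
  let positions := traceback_data.1
  let scores := traceback_data.2
  let contig_indx := PySem.List.sorted ((PySem.List.slice positions none (some (-1))).map (fun p => p.2)) (fun x => x) false
  let query_indx := PySem.List.sorted ((PySem.List.slice positions none (some (-1))).map (fun p => p.1)) (fun x => x) false
  match PySem.List.min? contig_indx (fun x => x), PySem.List.max? contig_indx (fun x => x),
        PySem.List.min? query_indx (fun x => x), PySem.List.max? query_indx (fun x => x) with
  | some contig_beg, some contig_end, some query_beg, some query_end =>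
      [contig_beg, contig_end, query_beg, query_end, scores.sum]
  | _, _, _, _ => []   -- min()/max() of an empty list: ValueError, excluded by Pre_

-- ===== PORT B =====
def parse_traceback_scores_alt (traceback_data : (List (Int × Int)) × List Int) : List Int :=
  let scores := traceback_data.2
  match PySem.List.slice traceback_data.1 none (some (-1)) with
  | [] => []   -- B raises ValueError here, excluded by Pre_
  | (q0, c0) :: rest =>
    let st := rest.foldl (fun (acc : Int × Int × Int × Int) p =>
      (if p.2 < acc.1 then p.2 else acc.1,
       if acc.2.1 < p.2 then p.2 else acc.2.1,
       if p.1 < acc.2.2.1 then p.1 else acc.2.2.1,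
       if acc.2.2.2 < p.1 then p.1 else acc.2.2.2)) (c0, c0, q0, q0)
    [st.1, st.2.1, st.2.2.1, st.2.2.2, scores.sum]

-- ===== PRECONDITION & SPEC =====
-- Pre_ excludes exactly the inputs with fewer than two positions, where positions[:-1] is
-- empty and A raises ValueError (min of an empty list); B raises ValueError there too.
def Pre_parse_traceback_scores (traceback_data : (List (Int × Int)) × List Int) : Prop :=
  2 ≤ traceback_data.1.length
instance (traceback_data : (List (Int × Int)) × List Int) : Decidable (Pre_parse_traceback_scores traceback_data) := by unfold Pre_parse_traceback_scores; infer_instance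

def pvWitness_parse_traceback_scores : ((List (Int × Int)) × List Int) := ([(1, 2), (3, 4)], [5])

def Spec_parse_traceback_scores (traceback_data : (List (Int × Int)) × List Int) (out : List Int) : Prop := out = parse_traceback_scores_alt traceback_data
instance (traceback_data : (List (Int × Int)) × List Int) (out : List Int) : Decidable (Spec_parse_traceback_scores traceback_data out) := by unfold Spec_parse_traceback_scores; infer_instance

-- ===== CLAIM (what is proved, stated in full; the proofs are below) =====
def Claim_equal_parse_traceback_scores : Prop := ∀ (traceback_data : (List (Int × Int)) × List Int), Dom_parse_traceback_scores traceback_data → Pre_parse_traceback_scores traceback_data → Spec_parse_traceback_scores traceback_data (parse_traceback_scores traceback_data)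

-- ===== LEMMAS AND PROOFS =====

-- min?/max? (no key) over Int lists is the extremal VALUE, hence invariant under sorting.
theorem pv_min?_sorted (L : List Int) :
    PySem.List.min? (PySem.List.sorted L (fun x => x) false) (fun x => x)
      = PySem.List.min? L (fun x => x) := by
  rcases L with _ | ⟨x, t⟩
  · rfl
  · rcases hm : PySem.List.min? (PySem.List.sorted (x :: t) (fun x => x) false) (fun x => x) with _ | m
    · rw [PySem.List.min?_eq_none_iff, PySem.List.sorted_eq_nil_iff] at hm; simp at hm
    · rcases hn : PySem.List.min? (x :: t) (fun x => x) with _ | n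
      · rw [PySem.List.min?_eq_none_iff] at hn; simp at hn
      · have hmmem := PySem.List.min?_mem hm
        have hnmem := PySem.List.min?_mem hn
        rw [PySem.List.mem_sorted] at hmmem
        have h1 := PySem.List.min?_isMin hn m hmmem
        have h2 := PySem.List.min?_isMin hm n (by rw [PySem.List.mem_sorted]; exact hnmem)
        exact congrArg some (le_antisymm h2 h1)

theorem pv_max?_sorted (L : List Int) :
    PySem.List.max? (PySem.List.sorted L (fun x => x) false) (fun x => x)
      = PySem.List.max? L (fun x => x) := by
  rcases L with _ | ⟨x, t⟩
  · rfl
  · rcases hm : PySem.List.max? (PySem.List.sorted (x :: t) (fun x => x) false) (fun x => x) with _ | m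
    · rw [PySem.List.max?_eq_none_iff, PySem.List.sorted_eq_nil_iff] at hm; simp at hm
    · rcases hn : PySem.List.max? (x :: t) (fun x => x) with _ | n
      · rw [PySem.List.max?_eq_none_iff] at hn; simp at hn
      · have hmmem := PySem.List.max?_mem hm
        have hnmem := PySem.List.max?_mem hn
        rw [PySem.List.mem_sorted] at hmmem
        have h1 := PySem.List.max?_isMax hn m hmmem
        have h2 := PySem.List.max?_isMax hm n (by rw [PySem.List.mem_sorted]; exact hnmem)
        exact congrArg some (le_antisymm h1 h2)

theorem pv_if_min (a b : Int) : (if b < a then b else a) = min a b := by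
  rw [min_def]; split_ifs <;> omega

theorem pv_if_max (a b : Int) : (if a < b then b else a) = max a b := by
  rw [max_def]; split_ifs <;> omega

-- B's four-accumulator fold is the four projected min/max folds.
theorem pv_fold_split (l : List (Int × Int)) (cb ce qb qe : Int) :
    l.foldl (fun (acc : Int × Int × Int × Int) p =>
      (if p.2 < acc.1 then p.2 else acc.1,
       if acc.2.1 < p.2 then p.2 else acc.2.1,
       if p.1 < acc.2.2.1 then p.1 else acc.2.2.1,
       if acc.2.2.2 < p.1 then p.1 else acc.2.2.2)) (cb, ce, qb, qe)
    = ((l.map (fun p => p.2)).foldl min cb, (l.map (fun p => p.2)).foldl max ce,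
       (l.map (fun p => p.1)).foldl min qb, (l.map (fun p => p.1)).foldl max qe) := by
  induction l generalizing cb ce qb qe with
  | nil => rfl
  | cons h t ih =>
      simp only [List.foldl_cons, List.map_cons]
      rw [ih]
      simp only [pv_if_min, pv_if_max]

-- ===== VERDICT (by name: the statement is the Claim_ definition above) =====
theorem parse_traceback_scores_spec : Claim_equal_parse_traceback_scores := by
  intro td _ hpre
  unfold Spec_parse_traceback_scores parse_traceback_scores parse_traceback_scores_alt
  simp only [PySem.List.slice_to_neg_one]
  rcases hc : td.1.dropLast with _ | ⟨⟨q0, c0⟩, rest⟩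

  · exfalso
    have : td.1.dropLast.length = td.1.length - 1 := by simp
    unfold Pre_parse_traceback_scores at hpre
    rw [hc] at this; simp at this; omega
  · simp only [List.map_cons, pv_min?_sorted, pv_max?_sorted,
      PySem.List.min?_id_cons, PySem.List.max?_id_cons, pv_fold_split]
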